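-- pv_equiv track=rewrite | github.com/wilmurillo-ai/Design-Assistant | .skills/openclaw-skills/skills/believe3344/xiaoai-ha-control/bridge_server.py | extract_final_reply
-- ===== SOURCE A (Python) =====
-- def extract_final_reply(stdout: str) -> str:
--     ignored = {'NO_REPLY', 'completed', 'done', 'success', 'ok'}
--     lines = [line.strip() for line in (stdout or '').splitlines() if line.strip()]
--     if not lines:
--         return ''
--     for line in reversed(lines):
--         if line.lower() not in ignored:
--             return line
--     return ''
-- ===== SOURCE B (Python) =====
-- def extract_final_reply(stdout: str) -> str:
--     ignored = {'NO_REPLY', 'completed', 'done', 'success', 'ok'}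
--     result = ''
--     for line in (stdout or '').splitlines():
--         s = line.strip()
--         if s and s.lower() not in ignored:
--             result = s
--     return result
-- ===== Notes on version B (the rewrite author's own statement) =====
-- stated objective: simpler
-- what changed: Replaced the filtered intermediate list plus reverse scan with early return by a single forward pass that overwrites an accumulator with the last qualifying stripped line.
import Mathlib
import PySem

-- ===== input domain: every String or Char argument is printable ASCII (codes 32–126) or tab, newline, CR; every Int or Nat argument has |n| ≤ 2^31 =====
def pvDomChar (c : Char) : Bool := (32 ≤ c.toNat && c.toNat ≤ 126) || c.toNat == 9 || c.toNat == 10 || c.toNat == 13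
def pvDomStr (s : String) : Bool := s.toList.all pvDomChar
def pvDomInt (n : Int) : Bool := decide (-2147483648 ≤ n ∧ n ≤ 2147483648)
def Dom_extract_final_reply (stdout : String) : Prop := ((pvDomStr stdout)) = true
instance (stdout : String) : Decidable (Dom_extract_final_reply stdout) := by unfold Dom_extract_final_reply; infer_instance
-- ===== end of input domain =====

-- B replaces A's filtered intermediate list + reverse scan by a single forward
-- pass that overwrites an accumulator with the last qualifying line (simpler).

-- ===== PORT A =====
-- literal port of A: build the list of non-empty stripped lines, then scan it in
-- reverse for the first line whose lower-case form is not in the ignored set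
def extract_final_reply (stdout : String) : String :=
  let ignored : PySem.Set String :=
    PySem.Set.ofList ["NO_REPLY", "completed", "done", "success", "ok"]
  let lines : List String :=
    (PySem.Str.splitlines (if stdout ≠ "" then stdout else "")).filterMap
      (fun line => if PySem.Str.strip line ≠ "" then some (PySem.Str.strip line) else none)
  if lines = [] then ""
  else
    match lines.reverse.find?
        (fun line => !(PySem.Set.contains ignored (PySem.Str.lower line))) with
    | some line => line
    | none => ""

-- ===== PORT B =====
-- port of B: one forward pass, overwriting the accumulator with each qualifying line
def extract_final_reply_alt (stdout : String) : String :=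
  let ignored : PySem.Set String :=
    PySem.Set.ofList ["NO_REPLY", "completed", "done", "success", "ok"]
  (PySem.Str.splitlines (if stdout ≠ "" then stdout else "")).foldl
    (fun result line =>
      let s := PySem.Str.strip line
      if s ≠ "" ∧ PySem.Set.contains ignored (PySem.Str.lower s) = false then s else result)
    ""

-- ===== PRECONDITION & SPEC =====
def Spec_extract_final_reply (stdout : String) (out : String) : Prop := out = extract_final_reply_alt stdout
instance (stdout : String) (out : String) : Decidable (Spec_extract_final_reply stdout out) := by unfold Spec_extract_final_reply; infer_instance

-- ===== CLAIM (what is proved, stated in full; the proofs are below) =====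
def Claim_equal_extract_final_reply : Prop := ∀ (stdout : String), Dom_extract_final_reply stdout → Spec_extract_final_reply stdout (extract_final_reply stdout)

-- ===== LEMMAS AND PROOFS =====

-- the ignored set and the two predicates the ports use
def pvIgn : PySem.Set String :=
  PySem.Set.ofList ["NO_REPLY", "completed", "done", "success", "ok"]

def pvP (line : String) : Bool := !(PySem.Set.contains pvIgn (PySem.Str.lower line))

def pvQ (line : String) : Bool :=
  decide (PySem.Str.strip line ≠ "") && pvP (PySem.Str.strip line)

-- B's fold keeps the last line satisfying pvQ (stripped), else the initial value
theorem pvFoldl_eq_find (xs : List String) (r : String) :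
    xs.foldl
      (fun result line =>
        let s := PySem.Str.strip line
        if s ≠ "" ∧ PySem.Set.contains pvIgn (PySem.Str.lower s) = false then s else result) r
    = ((xs.reverse.find? pvQ).map PySem.Str.strip).getD r := by
  induction xs generalizing r with
  | nil => rfl
  | cons x xs ih =>
    simp only [List.foldl_cons, List.reverse_cons, List.find?_append, ih]
    cases h : xs.reverse.find? pvQ with
    | some l => simp [Option.some_or]
    | none =>
      simp only [Option.none_or]
      by_cases hq : pvQ x = true
      · have hs : PySem.Str.strip x ≠ "" ∧
            PySem.Set.contains pvIgn (PySem.Str.lower (PySem.Str.strip x)) = false := by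
          simp only [pvQ, pvP, Bool.and_eq_true, decide_eq_true_eq, Bool.not_eq_true'] at hq
          exact hq
        simp only [List.find?, hq, Option.map_some, Option.getD_some]
        simp only [hs.1, hs.2, ne_eq, not_false_iff, and_self, if_true]
        rfl
      · have hs : ¬ (PySem.Str.strip x ≠ "" ∧
            PySem.Set.contains pvIgn (PySem.Str.lower (PySem.Str.strip x)) = false) := by
          simp only [pvQ, pvP, Bool.and_eq_true, decide_eq_true_eq, Bool.not_eq_true'] at hq
          exact hq
        simp only [List.find?, Bool.not_eq_true] at *
        rw [hq]
        simp only [Option.map_none, Option.getD_none]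
        rw [if_neg hs]

-- find? over A's filtered-and-stripped list = find? of pvQ over the raw lines, stripped
theorem pvFind_filterMap (ys : List String) :
    (ys.filterMap
      (fun line => if PySem.Str.strip line ≠ "" then some (PySem.Str.strip line) else none)).find? pvP
    = (ys.find? pvQ).map PySem.Str.strip := by
  induction ys with
  | nil => rfl
  | cons y ys ih =>
    by_cases hs : PySem.Str.strip y ≠ ""
    · simp only [List.filterMap_cons, if_pos hs]
      by_cases hp : pvP (PySem.Str.strip y) = true
      · have hq : pvQ y = true := by simp [pvQ, hs, hp]
        simp [List.find?, hp, hq]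
      · have hq : pvQ y = false := by
          simp only [pvQ, Bool.and_eq_false_iff]
          right; simpa using hp
        simp only [List.find?, hp, hq]
        simpa using ih
    · have hq : pvQ y = false := by simp [pvQ, hs]
      simp only [List.filterMap_cons, if_neg hs, List.find?, hq]
      simpa using ih

-- ===== VERDICT (by name: the statement is the Claim_ definition above) =====
theorem extract_final_reply_spec : Claim_equal_extract_final_reply := by
  intro stdout _
  show extract_final_reply stdout = extract_final_reply_alt stdout
  unfold extract_final_reply extract_final_reply_alt
  set ss := PySem.Str.splitlines (if stdout ≠ "" then stdout else "") with hss
  simp only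
  rw [show (PySem.Set.ofList ["NO_REPLY", "completed", "done", "success", "ok"]) = pvIgn from rfl]
  rw [pvFoldl_eq_find ss ""]
  set lines : List String :=
    ss.filterMap
      (fun line => if PySem.Str.strip line ≠ "" then some (PySem.Str.strip line) else none)
    with hlines
  have hrev : lines.reverse
      = ss.reverse.filterMap
          (fun line => if PySem.Str.strip line ≠ "" then some (PySem.Str.strip line) else none) := by
    simp [hlines]
  by_cases h0 : lines = []
  · have : ss.reverse.find? pvQ = none := by
      have := pvFind_filterMap ss.reverse
      rw [← hrev, h0] at this
      simp only [List.reverse_nil, List.find?_nil] at this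
      cases hf : ss.reverse.find? pvQ with
      | none => rfl
      | some l => rw [hf] at this; simp at this
    simp [h0, this]
  · rw [if_neg h0]
    have hfind : lines.reverse.find? pvP = (ss.reverse.find? pvQ).map PySem.Str.strip := by
      rw [hrev]; exact pvFind_filterMap ss.reverse
    have hpred : (fun line => !(PySem.Set.contains pvIgn (PySem.Str.lower line))) = pvP := rfl
    rw [hpred, hfind]
    cases ss.reverse.find? pvQ with
    | none => rfl
    | some l => rfl
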